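-- pv_equiv track=rewrite | github.com/APuzyk/algorithms_coursera | 2cnf.py | check_sat
-- ===== SOURCE A (Python) =====
-- def check_sat(sccs):
--     # check if we have both positive and neg in same scc
--     sat = True
--     for i in sccs:
--         for j in i:
--             if j*-1 in i:
--                 sat = False
--                 break
--     return sat
-- ===== SOURCE B (Python) =====
-- def check_sat(sccs):
--     # Sort each SCC and run a two-pointer zero-sum pair search:
--     # a literal and its negation coexist iff some pair (possibly a single 0)
--     # in the sorted list sums to zero.
--     for scc in sccs:
--         a = sorted(scc)
--         l, r = 0, len(a) - 1
--         while l <= r: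
--             s = a[l] + a[r]
--             if s == 0:
--                 return False
--             if s < 0:
--                 l += 1
--             else:
--                 r -= 1
--     return True
-- ===== Notes on version B (the rewrite author's own statement) =====
-- stated objective: alternative
-- what changed: Replaces A's nested membership scan by sorting each SCC and running a two-pointer zero-sum pair search (a literal and its negation coexist iff some pair, possibly a lone 0, sums to zero), with an early return on the first conflict.
import Mathlib
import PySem

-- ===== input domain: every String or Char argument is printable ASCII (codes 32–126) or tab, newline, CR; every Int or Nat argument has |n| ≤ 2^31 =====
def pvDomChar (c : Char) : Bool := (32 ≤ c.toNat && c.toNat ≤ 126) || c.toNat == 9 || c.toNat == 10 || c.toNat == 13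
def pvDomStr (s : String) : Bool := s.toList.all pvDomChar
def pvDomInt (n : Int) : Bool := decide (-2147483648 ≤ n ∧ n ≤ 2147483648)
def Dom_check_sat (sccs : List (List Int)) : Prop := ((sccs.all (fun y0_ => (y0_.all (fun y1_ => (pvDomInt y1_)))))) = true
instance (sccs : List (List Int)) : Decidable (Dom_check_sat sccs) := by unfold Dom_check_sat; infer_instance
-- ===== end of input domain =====

-- B replaces A's nested membership scan by sorting each SCC and running a
-- two-pointer zero-sum pair search with early exit; return values agree everywhere.


-- ===== PORT A =====
-- inner 'for j in i: if j*-1 in i: sat = False; break' loop; returns the new sat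
def check_sat_inner (i : List Int) (js : List Int) (sat : Bool) : Bool :=
  match js with
  | [] => sat
  | j :: rest => if i.contains (j * -1) then false else check_sat_inner i rest sat

def check_sat (sccs : List (List Int)) : Bool :=
  sccs.foldl (fun sat i => check_sat_inner i i sat) true

-- ===== PORT B =====
-- the 'while l <= r' two-pointer loop of Source B; the 'r < a.length' / 'r = 0'
-- guards only make the Nat-indexed computation total (in Python r may reach -1)
def twoPtr (a : List Int) (l r : Nat) : Bool :=
  if h : l ≤ r ∧ r < a.length then
    if a.getD l 0 + a.getD r 0 = 0 then true
    else if a.getD l 0 + a.getD r 0 < 0 then twoPtr a (l + 1) r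
    else if r = 0 then false else twoPtr a l (r - 1)
  else false
termination_by r + 1 - l
decreasing_by all_goals omega

-- body of Source B's outer 'for scc in sccs' loop for one scc (sort, then two pointers)
def sccConflict (scc : List Int) : Bool :=
  let a := PySem.List.sorted scc (fun x => x) false
  twoPtr a 0 (a.length - 1)

-- outer loop with the early 'return False'
def check_sat_alt (sccs : List (List Int)) : Bool :=
  match sccs with
  | [] => true
  | scc :: rest => if sccConflict scc then false else check_sat_alt rest

-- ===== PRECONDITION & SPEC =====
def Spec_check_sat (sccs : List (List Int)) (out : Bool) : Prop := out = check_sat_alt sccs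
instance (sccs : List (List Int)) (out : Bool) : Decidable (Spec_check_sat sccs out) := by unfold Spec_check_sat; infer_instance

-- ===== CLAIM (what is proved, stated in full; the proofs are below) =====
def Claim_equal_check_sat : Prop := ∀ (sccs : List (List Int)), Dom_check_sat sccs → Spec_check_sat sccs (check_sat sccs)

-- ===== LEMMAS AND PROOFS =====
-- A's inner loop computes: sat unless some j in js has its negation in i
lemma check_sat_inner_eq (i js : List Int) (sat : Bool) :
    check_sat_inner i js sat = (sat && !(js.any (fun j => i.contains (j * -1)))) := by
  induction js with
  | nil => simp [check_sat_inner]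
  | cons j rest ih =>
    by_cases h : (-j) ∈ i
    · simp [check_sat_inner, h]
    · simp [check_sat_inner, h, ih]

-- folding a && of per-element tests is List.all
lemma foldl_and_all (g : List Int → Bool) (sccs : List (List Int)) (b : Bool) :
    sccs.foldl (fun sat i => sat && g i) b = (b && sccs.all g) := by
  induction sccs generalizing b with
  | nil => simp
  | cons s rest ih => simp [List.foldl_cons, ih, Bool.and_assoc]

-- B's early-return loop is List.all of "no conflict"
lemma check_sat_alt_eq_all (sccs : List (List Int)) :
    check_sat_alt sccs = sccs.all (fun scc => !sccConflict scc) := by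
  induction sccs with
  | nil => simp [check_sat_alt]
  | cons s rest ih =>
    by_cases h : sccConflict s <;> simp [check_sat_alt, h, ih]

-- two-pointer correctness on a list whose getD values are monotone
lemma twoPtr_iff (a : List Int)
    (hm : ∀ p q : Nat, p ≤ q → q < a.length → a.getD p 0 ≤ a.getD q 0) :
    ∀ (n l r : Nat), r + 1 - l ≤ n → r < a.length →
      (twoPtr a l r = true ↔
        ∃ i j : Nat, l ≤ i ∧ i ≤ j ∧ j ≤ r ∧ a.getD i 0 + a.getD j 0 = 0) := by
  intro n
  induction n with
  | zero =>
    intro l r hn hr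
    rw [twoPtr, dif_neg (by omega)]
    simp only [Bool.false_eq_true, false_iff]
    rintro ⟨i, j, hi, hij, hjr, -⟩
    omega
  | succ n ih =>
    intro l r hn hr
    rw [twoPtr]
    by_cases hlr : l ≤ r
    · rw [dif_pos ⟨hlr, hr⟩]
      by_cases h0 : a.getD l 0 + a.getD r 0 = 0
      · rw [if_pos h0]
        simp only [true_iff]
        exact ⟨l, r, le_refl l, hlr, le_refl r, h0⟩
      · rw [if_neg h0]
        by_cases hneg : a.getD l 0 + a.getD r 0 < 0
        · rw [if_pos hneg, ih (l + 1) r (by omega) hr]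
          constructor
          · rintro ⟨i, j, hi, hij, hjr, hsum⟩
            exact ⟨i, j, by omega, hij, hjr, hsum⟩
          · rintro ⟨i, j, hi, hij, hjr, hsum⟩
            rcases Nat.lt_or_ge l i with hlt | hge
            · exact ⟨i, j, by omega, hij, hjr, hsum⟩
            · exfalso
              have hil : i = l := by omega
              have hmono : a.getD j 0 ≤ a.getD r 0 := hm j r hjr hr
              subst hil; omega
        · rw [if_neg hneg]
          by_cases hr0 : r = 0
          · rw [if_pos hr0]
            simp only [Bool.false_eq_true, false_iff]
            rintro ⟨i, j, hi, hij, hjr, hsum⟩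
            have hil : i = l ∧ j = r := by omega
            obtain ⟨h1, h2⟩ := hil
            subst h1; subst h2; omega
          · rw [if_neg hr0, ih l (r - 1) (by omega) (by omega)]
            constructor
            · rintro ⟨i, j, hi, hij, hjr, hsum⟩
              exact ⟨i, j, hi, hij, by omega, hsum⟩
            · rintro ⟨i, j, hi, hij, hjr, hsum⟩
              rcases Nat.lt_or_ge j r with hlt | hge
              · exact ⟨i, j, hi, hij, by omega, hsum⟩
              · exfalso
                have hjrr : j = r := by omega
                have hmono : a.getD l 0 ≤ a.getD i 0 := hm l i hi (by omega)
                subst hjrr; omega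
    · rw [dif_neg (by omega)]
      simp only [Bool.false_eq_true, false_iff]
      rintro ⟨i, j, hi, hij, hjr, -⟩
      omega

-- per-SCC: B's sorted two-pointer test equals "some literal's negation is present"
lemma sccConflict_iff (scc : List Int) :
    sccConflict scc = true ↔ ∃ x ∈ scc, -x ∈ scc := by
  unfold sccConflict
  have hperm : ∀ x : Int, x ∈ PySem.List.sorted scc (fun x => x) false ↔ x ∈ scc :=
    fun x => PySem.List.mem_sorted scc (fun x => x) false x
  set a := PySem.List.sorted scc (fun x => x) false with ha
  rcases Nat.eq_zero_or_pos a.length with hlen | hlen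
  · have ha0 : a = [] := List.length_eq_zero_iff.mp hlen
    have hs0 : scc = [] := by
      rcases hsc : scc with _ | ⟨x, t⟩
      · rfl
      · exfalso
        have hx : x ∈ a := (hperm x).2 (by rw [hsc]; simp)
        rw [ha0] at hx
        simp at hx
    rw [ha0]
    simp only [List.length_nil]
    rw [twoPtr, dif_neg (by simp)]
    simp [hs0]
  · have hmono : ∀ p q : Nat, p ≤ q → q < a.length → a.getD p 0 ≤ a.getD q 0 := by
      intro p q hpq hq
      rw [List.getD_eq_getElem a 0 (by omega), List.getD_eq_getElem a 0 hq]
      exact PySem.List.sorted_id_getElem_mono scc hpq hq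
    rw [twoPtr_iff a hmono (a.length - 1 + 1 - 0) 0 (a.length - 1) (le_refl _) (by omega)]
    constructor
    · rintro ⟨i, j, -, hij, hjr, hsum⟩
      have hj : j < a.length := by omega
      have hi : i < a.length := by omega
      refine ⟨a.getD i 0, ?_, ?_⟩
      · rw [← hperm]
        rw [List.getD_eq_getElem a 0 hi]
        exact List.getElem_mem hi
      · rw [← hperm]
        have hneg : -(a.getD i 0) = a.getD j 0 := by omega
        rw [hneg, List.getD_eq_getElem a 0 hj]
        exact List.getElem_mem hj
    · rintro ⟨x, hx, hnx⟩
      obtain ⟨i, hi, hxi⟩ := List.mem_iff_getElem.1 ((hperm x).2 hx)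
      obtain ⟨j, hj, hxj⟩ := List.mem_iff_getElem.1 ((hperm (-x)).2 hnx)
      rcases Nat.le_total i j with hle | hlt
      · exact ⟨i, j, Nat.zero_le _, hle, by omega,
          by rw [List.getD_eq_getElem a 0 hi, List.getD_eq_getElem a 0 hj, hxi, hxj]; ring⟩
      · exact ⟨j, i, Nat.zero_le _, by omega, by omega,
          by rw [List.getD_eq_getElem a 0 hj, List.getD_eq_getElem a 0 hi, hxi, hxj]; ring⟩

-- per-SCC agreement of the two tests
lemma point_eq (i : List Int) :
    (!(i.any (fun j => i.contains (j * -1)))) = (!sccConflict i) := by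
  have h : (i.any (fun j => i.contains (j * -1))) = sccConflict i := by
    rw [Bool.eq_iff_iff, sccConflict_iff]
    simp only [List.any_eq_true, List.contains_iff_mem]
    constructor
    · rintro ⟨j, hj, hmem⟩
      exact ⟨j, hj, by rwa [show j * -1 = -j by ring] at hmem⟩
    · rintro ⟨x, hx, hnx⟩
      exact ⟨x, hx, by rwa [show x * -1 = -x by ring]⟩
  rw [h]

-- ===== VERDICT (by name: the statement is the Claim_ definition above) =====
theorem check_sat_spec : Claim_equal_check_sat := by
  intro sccs _
  unfold Spec_check_sat check_sat
  simp only [check_sat_inner_eq]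
  rw [foldl_and_all, check_sat_alt_eq_all]
  simp only [point_eq]
  simp
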